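-- pv_equiv track=rewrite | github.com/fortesg/fortrancallgraph | source.py | __removeStringsFromStatement
-- ===== SOURCE A (Python) =====
-- def __removeStringsFromStatement(statement):
--     cleanStatement = ''
--     inString = False
--     escape = False
--     delimiter = ''
--     for c in statement:
--         if not inString:
--             cleanStatement += c
--             if c == "'" or c == '"':
--                 inString = True
--                 escape = False
--                 delimiter = c;
--         else:
--             if c == delimiter and not escape:
--                 cleanStatement += c
--                 inString = False
--             escape = not escape and c == '\\'
--
--     return cleanStatement
-- ===== SOURCE B (Python) =====
-- def __removeStringsFromStatement(statement):
--     # Jump-based scanner: copy chars until a quote, then pair-skip escaped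
--     # characters (backslash consumes the next char) until the matching quote.
--     out = []
--     n = len(statement)
--     i = 0
--     while i < n:
--         c = statement[i]
--         out.append(c)
--         i += 1
--         if c == "'" or c == '"':
--             while i < n:
--                 b = statement[i]
--                 if b == '\\':
--                     i += 2
--                 elif b == c:
--                     out.append(c)
--                     i += 1
--                     break
--                 else:
--                     i += 1
--     return ''.join(out)
-- ===== Notes on version B (the rewrite author's own statement) =====
-- stated objective: alternative
-- what changed: Replaces A's single-pass inString/escape/delimiter boolean state machine with a nested scanner: an outer loop copies characters until a quote, then an inner loop pair-skips backslash escapes (i += 2) until the matching quote, so the escape flag and inString state disappear.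
import Mathlib
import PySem

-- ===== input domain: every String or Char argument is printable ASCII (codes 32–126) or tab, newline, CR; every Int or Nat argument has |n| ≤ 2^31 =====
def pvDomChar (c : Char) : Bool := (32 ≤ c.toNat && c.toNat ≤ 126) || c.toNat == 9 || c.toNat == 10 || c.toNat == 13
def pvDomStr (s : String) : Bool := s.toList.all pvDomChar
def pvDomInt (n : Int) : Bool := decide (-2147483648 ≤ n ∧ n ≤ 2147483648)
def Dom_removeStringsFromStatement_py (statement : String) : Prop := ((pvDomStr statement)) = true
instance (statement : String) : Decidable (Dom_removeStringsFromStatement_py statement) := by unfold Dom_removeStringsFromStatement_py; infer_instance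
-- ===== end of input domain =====

-- B replaces A's one-pass inString/escape/delimiter state machine by a nested scanner that
-- pair-skips backslash escapes; alternative decomposition, same cost.

-- ===== PORT A =====
-- state = (cleanStatement, inString, escape, delimiter); one step of A's for-loop body
def pvAStep (st : String × Bool × Bool × String) (c : Char) : String × Bool × Bool × String :=
  let (acc, inS, esc, delim) := st
  if !inS then
    let acc' := acc.push c
    if c = '\'' ∨ c = '"' then (acc', true, false, String.singleton c)
    else (acc', inS, esc, delim)
  else
    if String.singleton c = delim ∧ esc = false then
      (acc.push c, false, (!esc && c = '\\'), delim)
    else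
      (acc, inS, (!esc && c = '\\'), delim)

def removeStringsFromStatement_py (statement : String) : String :=
  (statement.toList.foldl pvAStep ("", false, false, "")).1

-- ===== PORT B =====
mutual
-- outer while-loop of B: copy chars until a quote is seen
def pvBOut : List Char → List Char
  | [] => []
  | c :: cs => c :: (if c = '\'' ∨ c = '"' then pvBIn c cs else pvBOut cs)
termination_by cs => cs.length
-- inner while-loop of B: skip the string body, pairing '\' with the next char
def pvBIn (d : Char) : List Char → List Char
  | [] => []
  | b :: cs =>
    if b = '\\' then
      match cs with
      | [] => []
      | _ :: cs' => pvBIn d cs'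
    else if b = d then d :: pvBOut cs
    else pvBIn d cs
termination_by cs => cs.length
end

def removeStringsFromStatement_py_alt (statement : String) : String :=
  String.ofList (pvBOut statement.toList)

-- ===== PRECONDITION & SPEC =====
def Spec_removeStringsFromStatement_py (statement : String) (out : String) : Prop := out = removeStringsFromStatement_py_alt statement
instance (statement : String) (out : String) : Decidable (Spec_removeStringsFromStatement_py statement out) := by unfold Spec_removeStringsFromStatement_py; infer_instance

-- ===== CLAIM (what is proved, stated in full; the proofs are below) =====
def Claim_equal_removeStringsFromStatement_py : Prop := ∀ (statement : String), Dom_removeStringsFromStatement_py statement → Spec_removeStringsFromStatement_py statement (removeStringsFromStatement_py statement)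

-- ===== LEMMAS AND PROOFS =====

theorem pv_singleton_inj (a b : Char) : String.singleton a = String.singleton b ↔ a = b := by
  constructor
  · intro h
    have := congrArg String.toList h
    simpa [String.singleton] using this
  · intro h; rw [h]

mutual
theorem pv_out_lem (cs : List Char) (acc : String) (e : Bool) (d : String) :
    ((cs.foldl pvAStep (acc, false, e, d)).1).toList = acc.toList ++ pvBOut cs := by
  match cs with
  | [] => simp [pvBOut]
  | c :: cs' =>
    by_cases hq : c = '\'' ∨ c = '"'
    · have h1 : pvAStep (acc, false, e, d) c = (acc.push c, true, false, String.singleton c) := by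
        simp [pvAStep, hq]
      have hd : c ≠ '\\' := by rcases hq with h | h <;> simp [h]
      rw [List.foldl_cons, h1, pv_in_lem cs' (acc.push c) c hd]
      simp [pvBOut, hq]
    · have h1 : pvAStep (acc, false, e, d) c = (acc.push c, false, e, d) := by
        simp [pvAStep, hq]
      rw [List.foldl_cons, h1, pv_out_lem cs' (acc.push c) e d]
      simp [pvBOut, hq]
termination_by cs.length

theorem pv_in_lem (cs : List Char) (acc : String) (d : Char) (hd : d ≠ '\\') :
    ((cs.foldl pvAStep (acc, true, false, String.singleton d)).1).toList = acc.toList ++ pvBIn d cs := by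
  match cs with
  | [] => simp [pvBIn]
  | b :: cs' =>
    by_cases hb : b = '\\'
    · subst hb
      have hsd : String.singleton '\\' ≠ String.singleton d :=
        fun h => hd (((pv_singleton_inj '\\' d).mp h).symm)
      have h1 : pvAStep (acc, true, false, String.singleton d) '\\'
          = (acc, true, true, String.singleton d) := by
        simp [pvAStep, hsd]
      rw [List.foldl_cons, h1]
      match cs' with
      | [] => rw [pvBIn.eq_def]; simp
      | x :: cs'' =>
        have h2 : pvAStep (acc, true, true, String.singleton d) x
            = (acc, true, false, String.singleton d) := by
          simp [pvAStep]
        rw [List.foldl_cons, h2, pv_in_lem cs'' acc d hd]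
        conv_rhs => rw [pvBIn.eq_def]
        simp
    · by_cases hbd : b = d
      · have h1 : pvAStep (acc, true, false, String.singleton d) b
            = (acc.push b, false, false, String.singleton d) := by
          simp [pvAStep, hbd, hd]
        rw [List.foldl_cons, h1, pv_out_lem cs' (acc.push b) false (String.singleton d)]
        subst hbd
        conv_rhs => rw [pvBIn.eq_def]
        simp [hb]
      · have h1 : pvAStep (acc, true, false, String.singleton d) b
            = (acc, true, false, String.singleton d) := by
          simp [pvAStep, pv_singleton_inj, hbd, hb]
        rw [List.foldl_cons, h1, pv_in_lem cs' acc d hd]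
        conv_rhs => rw [pvBIn.eq_def]
        simp [hb, hbd]
termination_by cs.length
end

-- ===== VERDICT (by name: the statement is the Claim_ definition above) =====
theorem removeStringsFromStatement_py_spec : Claim_equal_removeStringsFromStatement_py := by
  intro s _
  unfold Spec_removeStringsFromStatement_py removeStringsFromStatement_py removeStringsFromStatement_py_alt
  apply String.ext
  rw [String.toList_ofList]
  simpa using pv_out_lem s.toList "" false ""
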